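-- pv_equiv track=rewrite | github.com/nadeem4/MET-CS-566---Analysis-of-Algorithm | Solution3_NadeemKhan/assignment3_nadeem_khan.py | find_out_how_many_people_read_at_least_one_book
-- ===== SOURCE A (Python) =====
-- def find_out_how_many_people_read_at_least_one_book(checked_books):
--     people_dict = dict()
--
--     """
--     In this we will add person's email to people_dict every time we find a record of that email, then we will find the
--     total number of keys in order to find the number of people who read at least one book
--     """
--     for book in checked_books:
--         if book['email'] in people_dict:
--             people_dict[book['email']] += 1
--         else:
--             people_dict[book['email']] = 1
--
--     return len(people_dict.keys())
-- ===== SOURCE B (Python) =====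
-- def find_out_how_many_people_read_at_least_one_book(checked_books):
--     emails = sorted(book['email'] for book in checked_books)
--     count = 0
--     prev = None
--     for e in emails:
--         if prev is None or e != prev:
--             count += 1
--             prev = e
--     return count
-- ===== Notes on version B (the rewrite author's own statement) =====
-- stated objective: alternative
-- what changed: B replaces A's hash-map counting (build a per-email occurrence dict, return the number of keys) with a sort-then-scan: collect the emails, sort them, and count group boundaries between adjacent unequal elements.
import Mathlib
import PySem

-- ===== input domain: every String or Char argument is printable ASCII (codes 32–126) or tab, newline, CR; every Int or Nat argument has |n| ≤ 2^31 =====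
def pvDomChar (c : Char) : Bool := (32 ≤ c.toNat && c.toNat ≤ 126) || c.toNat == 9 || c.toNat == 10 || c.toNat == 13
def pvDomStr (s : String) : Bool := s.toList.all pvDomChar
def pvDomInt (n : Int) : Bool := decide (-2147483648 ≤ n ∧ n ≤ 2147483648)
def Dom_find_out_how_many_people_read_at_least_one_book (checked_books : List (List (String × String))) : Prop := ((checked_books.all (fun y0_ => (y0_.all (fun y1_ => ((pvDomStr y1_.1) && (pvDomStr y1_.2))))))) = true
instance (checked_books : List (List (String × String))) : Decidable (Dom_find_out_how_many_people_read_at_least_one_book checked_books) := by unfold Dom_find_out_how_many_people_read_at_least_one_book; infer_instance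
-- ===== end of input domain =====

-- B replaces A's dict-of-counters distinct count by sort-then-scan over adjacent groups (alternative decomposition, same result).

-- ===== PORT A =====
-- A's loop: build people_dict counting occurrences per email; `book['email']` is first-match
-- lookup in the record (none = KeyError, excluded by Pre_), so the loop threads an Option.
def pvALoop : List (List (String × String)) → PySem.Dict String Int → Option (PySem.Dict String Int)
  | [], d => some d
  | b :: rest, d =>
    match PySem.Dict.get? (PySem.Dict.mk b) "email" with
    | none => none
    | some e =>
      if PySem.Dict.contains d e then
        pvALoop rest (PySem.Dict.insert d e (PySem.Dict.getD d e 0 + 1))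
      else
        pvALoop rest (PySem.Dict.insert d e 1)

def find_out_how_many_people_read_at_least_one_book (checked_books : List (List (String × String))) : Int :=
  match pvALoop checked_books PySem.Dict.empty with
  | some d => ((PySem.Dict.keys d).length : Int)
  | none => 0   -- KeyError: outside Pre_

-- ===== PORT B =====
-- the generator `book['email'] for book in checked_books` (none = KeyError, excluded by Pre_)
def pvBEmails? : List (List (String × String)) → Option (List String)
  | [] => some []
  | b :: rest =>
    match PySem.Dict.get? (PySem.Dict.mk b) "email" with
    | none => none
    | some e => (pvBEmails? rest).map (e :: ·)

-- the scan: `if prev is None or e != prev: count += 1; prev = e`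
def pvBScan : List String → Option String → Int → Int
  | [], _, c => c
  | e :: rest, prev, c =>
    if prev = none ∨ some e ≠ prev then pvBScan rest (some e) (c + 1)
    else pvBScan rest prev c

def find_out_how_many_people_read_at_least_one_book_alt (checked_books : List (List (String × String))) : Int :=
  match pvBEmails? checked_books with
  | none => 0   -- KeyError: outside Pre_
  | some es => pvBScan (PySem.List.sorted es (fun x => x) false) none 0

-- ===== PRECONDITION & SPEC =====
-- Pre_ excludes exactly the inputs where some record has no 'email' key: there A raises KeyError.
def Pre_find_out_how_many_people_read_at_least_one_book (checked_books : List (List (String × String))) : Prop :=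
  (checked_books.all (fun b => b.any (fun p => p.1 == "email"))) = true
instance (checked_books : List (List (String × String))) : Decidable (Pre_find_out_how_many_people_read_at_least_one_book checked_books) := by unfold Pre_find_out_how_many_people_read_at_least_one_book; infer_instance

def pvWitness_find_out_how_many_people_read_at_least_one_book : (List (List (String × String))) :=
  [[("email", "a@x.com"), ("title", "t1")], [("email", "b@x.com")], [("email", "a@x.com")]]

def Spec_find_out_how_many_people_read_at_least_one_book (checked_books : List (List (String × String))) (out : Int) : Prop := out = find_out_how_many_people_read_at_least_one_book_alt checked_books
instance (checked_books : List (List (String × String))) (out : Int) : Decidable (Spec_find_out_how_many_people_read_at_least_one_book checked_books out) := by unfold Spec_find_out_how_many_people_read_at_least_one_book; infer_instance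

-- ===== CLAIM (what is proved, stated in full; the proofs are below) =====
def Claim_equal_find_out_how_many_people_read_at_least_one_book : Prop := ∀ (checked_books : List (List (String × String))), Dom_find_out_how_many_people_read_at_least_one_book checked_books → Pre_find_out_how_many_people_read_at_least_one_book checked_books → Spec_find_out_how_many_people_read_at_least_one_book checked_books (find_out_how_many_people_read_at_least_one_book checked_books)

-- ===== LEMMAS AND PROOFS =====

-- a record containing an 'email' key looks up to some value
lemma getMk_some (b : List (String × String)) (h : (b.any (fun p => p.1 == "email")) = true) :
    ∃ e, PySem.Dict.get? (PySem.Dict.mk b) "email" = some e := by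
  induction b with
  | nil => simp at h
  | cons p rest ih =>
    rw [PySem.Dict.get?_mk_cons]
    by_cases hp : p.1 == "email"
    · simp [hp]
    · simp only [List.any_cons, Bool.or_eq_true] at h
      rcases h with h | h
      · exact absurd h hp
      · simpa [hp] using ih h

-- under Pre_, the B-side email extraction succeeds
lemma pvBEmails_some (cb : List (List (String × String)))
    (h : ∀ b ∈ cb, (b.any (fun p => p.1 == "email")) = true) :
    ∃ es, pvBEmails? cb = some es := by
  induction cb with
  | nil => exact ⟨[], rfl⟩
  | cons b rest ih =>
    obtain ⟨e, he⟩ := getMk_some b (h b (by simp))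
    obtain ⟨es, hes⟩ := ih (fun b' hb' => h b' (by simp [hb']))
    exact ⟨e :: es, by simp [pvBEmails?, he, hes]⟩

-- A's loop: the keys of the final dict are Set.update of the emails seen
lemma pvALoop_keys (cb : List (List (String × String))) :
    ∀ (es : List String), pvBEmails? cb = some es →
    ∀ d : PySem.Dict String Int, ∃ d', pvALoop cb d = some d' ∧
      PySem.Dict.keys d' = PySem.Set.update (PySem.Dict.keys d) es := by
  induction cb with
  | nil =>
    intro es hes d
    simp [pvBEmails?] at hes
    subst hes
    exact ⟨d, rfl, by simp [PySem.Set.update]⟩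
  | cons b rest ih =>
    intro es hes d
    simp only [pvBEmails?] at hes
    cases hg : PySem.Dict.get? (PySem.Dict.mk b) "email" with
    | none => rw [hg] at hes; simp at hes
    | some e =>
      rw [hg] at hes
      cases hr : pvBEmails? rest with
      | none => rw [hr] at hes; simp at hes
      | some es' =>
        rw [hr] at hes; simp at hes
        subst hes
        by_cases hc : PySem.Dict.contains d e = true
        · obtain ⟨d', h1, h2⟩ := ih es' hr (PySem.Dict.insert d e (PySem.Dict.getD d e 0 + 1))
          refine ⟨d', by simp [pvALoop, hg, hc, h1], ?_⟩
          rw [h2, PySem.Dict.keys_insert_of_contains _ _ hc]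
          have : PySem.Set.add (PySem.Dict.keys d) e = PySem.Dict.keys d := by
            simp [PySem.Set.add, PySem.Set.contains, ← PySem.Dict.contains_iff_mem_keys, hc]
          simp [PySem.Set.update, this]
        · obtain ⟨d', h1, h2⟩ := ih es' hr (PySem.Dict.insert d e 1)
          refine ⟨d', by simp [pvALoop, hg, hc, h1], ?_⟩
          rw [h2, PySem.Dict.keys_insert_of_not_contains _ _ (by simpa using hc)]
          have : PySem.Set.add (PySem.Dict.keys d) e = PySem.Dict.keys d ++ [e] := by
            simp [PySem.Set.add, PySem.Set.contains, ← PySem.Dict.contains_iff_mem_keys, hc]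
          simp [PySem.Set.update, this]

-- |set(es)| = number of distinct elements
lemma ofList_length_eq_card (es : List String) :
    (PySem.Set.ofList es).length = es.toFinset.card := by
  have h1 : (PySem.Set.ofList es).toFinset = es.toFinset := by
    ext x; simp [List.mem_toFinset, PySem.Set.mem_ofList]
  rw [← h1, List.toFinset_card_of_nodup (PySem.Set.nodup_ofList es)]

-- the scan over a sorted tail with previous element p counts the distinct elements other than p
lemma pvBScan_some (l : List String) :
    ∀ p c, l.Pairwise (fun a b => a ≤ b) → (∀ x ∈ l, p ≤ x) →
      pvBScan l (some p) c = c + ((l.toFinset.erase p).card : Int) := by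
  induction l with
  | nil => intro p c _ _; simp [pvBScan]
  | cons e rest ih =>
    intro p c hs hlb
    rw [List.pairwise_cons] at hs
    by_cases hep : e = p
    · subst hep
      have : pvBScan (e :: rest) (some e) c = pvBScan rest (some e) c := by
        simp [pvBScan]
      rw [this, ih e c hs.2 hs.1]
      congr 2
      rw [List.toFinset_cons, Finset.erase_insert_eq_erase]
    · have hpe : p < e := lt_of_le_of_ne (hlb e (by simp)) (fun h => hep h.symm)
      have : pvBScan (e :: rest) (some p) c = pvBScan rest (some e) (c + 1) := by
        simp [pvBScan, hep]
      rw [this, ih e (c + 1) hs.2 hs.1]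
      have hpnot : p ∉ (e :: rest).toFinset := by
        simp only [List.toFinset_cons, Finset.mem_insert, List.mem_toFinset]
        rintro (h | h)
        · exact absurd h.symm hep
        · exact absurd rfl (ne_of_lt (lt_of_lt_of_le hpe (hs.1 p h)))
      rw [Finset.erase_eq_of_notMem hpnot]
      have : ((e :: rest).toFinset).card = 1 + (rest.toFinset.erase e).card := by
        rw [List.toFinset_cons]
        by_cases he : e ∈ rest.toFinset
        · have hpos : 0 < rest.toFinset.card := Finset.card_pos.2 ⟨e, he⟩
          rw [Finset.insert_eq_self.2 he, Finset.card_erase_of_mem he]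
          omega
        · rw [Finset.card_insert_of_notMem he, Finset.erase_eq_of_notMem he]
          omega
      rw [this]; push_cast; ring

-- the full scan over a sorted list counts the distinct elements
lemma pvBScan_none (l : List String) (h : l.Pairwise (fun a b => a ≤ b)) :
    pvBScan l none 0 = (l.toFinset.card : Int) := by
  cases l with
  | nil => simp [pvBScan]
  | cons e rest =>
    rw [List.pairwise_cons] at h
    have : pvBScan (e :: rest) none 0 = pvBScan rest (some e) 1 := by
      simp [pvBScan]
    rw [this, pvBScan_some rest e 1 h.2 h.1]
    have : ((e :: rest).toFinset).card = 1 + (rest.toFinset.erase e).card := by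
      rw [List.toFinset_cons]
      by_cases he : e ∈ rest.toFinset
      · have hpos : 0 < rest.toFinset.card := Finset.card_pos.2 ⟨e, he⟩
        rw [Finset.insert_eq_self.2 he, Finset.card_erase_of_mem he]; omega
      · rw [Finset.card_insert_of_notMem he, Finset.erase_eq_of_notMem he]; omega
    rw [this]; push_cast; ring

-- ===== VERDICT (by name: the statement is the Claim_ definition above) =====
theorem find_out_how_many_people_read_at_least_one_book_spec : Claim_equal_find_out_how_many_people_read_at_least_one_book := by
  intro cb _ hpre
  unfold Spec_find_out_how_many_people_read_at_least_one_book
  unfold Pre_find_out_how_many_people_read_at_least_one_book at hpre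
  rw [List.all_eq_true] at hpre
  obtain ⟨es, hes⟩ := pvBEmails_some cb (fun b hb => hpre b hb)
  obtain ⟨d', h1, h2⟩ := pvALoop_keys cb es hes PySem.Dict.empty
  unfold find_out_how_many_people_read_at_least_one_book find_out_how_many_people_read_at_least_one_book_alt
  rw [h1, hes]
  simp only []
  have hA : (PySem.Dict.keys d').length = es.toFinset.card := by
    rw [h2, PySem.Dict.keys_empty]
    have : PySem.Set.update ([] : PySem.Set String) es = PySem.Set.ofList es := rfl
    rw [this, ofList_length_eq_card]
  have hpair : (PySem.List.sorted es (fun x => x) false).Pairwise (fun a b => a ≤ b) :=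
    PySem.List.sorted_pairwise es (fun x => x)
  have hB : pvBScan (PySem.List.sorted es (fun x => x) false) none 0
      = (((PySem.List.sorted es (fun x => x) false).toFinset.card : Nat) : Int) :=
    pvBScan_none _ hpair
  rw [hB, List.toFinset_eq_of_perm _ _ (PySem.List.sorted_perm es (fun x => x) false), hA]
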